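-- pv_equiv track=rewrite | github.com/ltatka/evolution | cleanUpMethods.py | getNumReactions
-- ===== SOURCE A (Python) =====
-- def getNumReactions(ant):
--     # Takes a list of strings for each line in ant file
--     nReactions = 0
--     for line in ant:
--         if not line.startswith('var'):
--             if line.startswith('k'):
--                 break
--             nReactions += 1
--     return nReactions
-- ===== SOURCE B (Python) =====
-- def getNumReactions(ant):
--     # Staged: locate the cut (first line starting with 'k'), then count by
--     # subtraction: lines before the cut minus the 'var' lines among them.
--     flags = [line.startswith('k') for line in ant]
--     stop = flags.index(True) if True in flags else len(ant)
--     return stop - sum(line.startswith('var') for line in ant[:stop])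
-- ===== Notes on version B (the rewrite author's own statement) =====
-- stated objective: alternative
-- what changed: Instead of a fused scan with a running counter and break, B first computes the cut index of the first 'k' line from a flag list, then returns that index minus the count of 'var' lines in the slice before it (counting by subtraction over staged passes).
import Mathlib
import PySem

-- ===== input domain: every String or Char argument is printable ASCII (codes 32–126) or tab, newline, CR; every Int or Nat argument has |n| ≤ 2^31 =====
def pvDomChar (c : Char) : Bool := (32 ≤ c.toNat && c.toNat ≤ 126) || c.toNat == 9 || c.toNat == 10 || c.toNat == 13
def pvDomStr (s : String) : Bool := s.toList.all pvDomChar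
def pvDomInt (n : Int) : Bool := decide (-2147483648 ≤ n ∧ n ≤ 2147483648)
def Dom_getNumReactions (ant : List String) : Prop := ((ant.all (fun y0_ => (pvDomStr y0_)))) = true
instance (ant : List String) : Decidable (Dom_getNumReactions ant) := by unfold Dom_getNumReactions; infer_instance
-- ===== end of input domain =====

-- B replaces A's fused loop-with-break by a staged computation: cut index of the first 'k' line, then count by subtraction (alternative decomposition; same cost).


-- ===== PORT A =====
-- A's loop with `break`, transliterated as structural recursion over the lines with the counter as accumulator.
def getNumReactionsGo : List String → Int → Int
  | [], n => n
  | l :: ls, n =>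
    if !(PySem.Str.startswith l "var") then
      if PySem.Str.startswith l "k" then n
      else getNumReactionsGo ls (n + 1)
    else getNumReactionsGo ls n

def getNumReactions (ant : List String) : Int := getNumReactionsGo ant 0

-- ===== PORT B =====
-- Source B: flags = [line.startswith('k')], stop = flags.index(True) if True in flags else len(ant),
-- return stop - sum(line.startswith('var') for line in ant[:stop])  (the 0/1-sum is countP).
def getNumReactions_alt (ant : List String) : Int :=
  let flags := ant.map (fun line => PySem.Str.startswith line "k")
  let stop : Int :=
    if true ∈ flags then (((PySem.List.index? flags true).getD 0 : Nat) : Int)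
    else (ant.length : Int)
  stop - ((PySem.List.slice ant none (some stop)).countP
            (fun line => PySem.Str.startswith line "var") : Int)

-- ===== PRECONDITION & SPEC =====
def Spec_getNumReactions (ant : List String) (out : Int) : Prop := out = getNumReactions_alt ant
instance (ant : List String) (out : Int) : Decidable (Spec_getNumReactions ant out) := by unfold Spec_getNumReactions; infer_instance

-- ===== CLAIM (what is proved, stated in full; the proofs are below) =====
def Claim_equal_getNumReactions : Prop := ∀ (ant : List String), Dom_getNumReactions ant → Spec_getNumReactions ant (getNumReactions ant)

-- ===== LEMMAS AND PROOFS =====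
-- a line starting with "var" does not start with "k"
theorem startswith_var_not_k (l : String) (h : PySem.Str.startswith l "var" = true) :
    PySem.Str.startswith l "k" = false := by
  rw [PySem.Str.startswith_eq] at h ⊢
  rw [PySem.Chars.startswith_iff] at h
  by_contra hk
  rw [Bool.not_eq_false, PySem.Chars.startswith_iff] at hk
  rcases h with ⟨t1, h1⟩
  rcases hk with ⟨t2, h2⟩
  rw [← h2] at h1
  simp at h1

theorem alt_nil : getNumReactions_alt [] = 0 := by decide

theorem alt_cons_k (l : String) (ls : List String)
    (hk : PySem.Str.startswith l "k" = true) :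
    getNumReactions_alt (l :: ls) = 0 := by
  unfold getNumReactions_alt
  simp only [List.map_cons, hk]
  rw [if_pos (by simp)]
  rw [PySem.List.index?_cons_self]
  simp

theorem alt_cons_not_k (l : String) (ls : List String)
    (hk : PySem.Str.startswith l "k" = false) :
    getNumReactions_alt (l :: ls) =
      (if PySem.Str.startswith l "var" then 0 else 1) + getNumReactions_alt ls := by
  unfold getNumReactions_alt
  simp only [List.map_cons, hk]
  cases h : PySem.List.index? (ls.map (fun line => PySem.Str.startswith line "k")) true with
  | none =>
    have hmem : true ∉ ls.map (fun line => PySem.Str.startswith line "k") :=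
      (PySem.List.index?_eq_none_iff _ _).mp h
    have hmem' : true ∉ (false :: ls.map (fun line => PySem.Str.startswith line "k")) := by
      intro hc
      rcases List.mem_cons.mp hc with h1 | h2
      · exact Bool.noConfusion h1
      · exact hmem h2
    rw [if_neg hmem', if_neg hmem]
    rw [show ((l :: ls).length : Int) = ((ls.length + 1 : Nat) : Int) by simp]
    rw [PySem.List.slice_to_natCast, PySem.List.slice_to_natCast]
    simp only [List.take_succ_cons, List.take_length, List.countP_cons]
    by_cases hv : PySem.Str.startswith l "var" = true
    · simp only [hv, if_true]; push_cast; ring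
    · simp only [hv, Bool.false_eq_true, if_false]; push_cast; ring
  | some i =>
    have hne : (false : Bool) ≠ true := by decide
    have hmem : true ∈ ls.map (fun line => PySem.Str.startswith line "k") := by
      by_contra hm
      rw [(PySem.List.index?_eq_none_iff _ _).mpr hm] at h
      simp at h
    rw [if_pos (List.mem_cons_of_mem _ hmem), if_pos hmem]
    rw [PySem.List.index?_cons_of_ne _ hne, h]
    simp only [Option.map_some, Option.getD_some]
    rw [show ((i + 1 : Nat) : Int) = (((i : Nat) + 1 : Nat) : Int) by push_cast; ring]
    rw [PySem.List.slice_to_natCast, PySem.List.slice_to_natCast]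
    simp only [List.take_succ_cons, List.countP_cons]
    by_cases hv : PySem.Str.startswith l "var" = true
    · simp only [hv, if_true]; push_cast; ring
    · simp only [hv, Bool.false_eq_true, if_false]; push_cast; ring

theorem go_eq (ant : List String) (n : Int) :
    getNumReactionsGo ant n = n + getNumReactions_alt ant := by
  induction ant generalizing n with
  | nil => simp [getNumReactionsGo, alt_nil]
  | cons l ls ih =>
    by_cases hv : PySem.Str.startswith l "var" = true
    · have hk := startswith_var_not_k l hv
      rw [alt_cons_not_k l ls hk]
      have hv' : PySem.Chars.startswith l.toList ['v','a','r'] = true := by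
        simpa [PySem.Str.startswith_eq] using hv
      simp [getNumReactionsGo, hv', ih n]
    · rw [Bool.not_eq_true] at hv
      have hv' : PySem.Chars.startswith l.toList ['v','a','r'] = false := by
        simpa [PySem.Str.startswith_eq] using hv
      by_cases hk : PySem.Str.startswith l "k" = true
      · have hk' : PySem.Chars.startswith l.toList ['k'] = true := by
          simpa [PySem.Str.startswith_eq] using hk
        rw [show getNumReactionsGo (l :: ls) n = n by simp [getNumReactionsGo, hv', hk']]
        rw [alt_cons_k l ls hk]; ring
      · rw [Bool.not_eq_true] at hk
        have hk' : PySem.Chars.startswith l.toList ['k'] = false := by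
          simpa [PySem.Str.startswith_eq] using hk
        rw [alt_cons_not_k l ls hk]
        simp only [getNumReactionsGo, hv, hk, Bool.not_false, Bool.false_eq_true, if_true,
          if_false]
        rw [ih (n + 1)]
        ring

-- ===== VERDICT (by name: the statement is the Claim_ definition above) =====
theorem getNumReactions_spec : Claim_equal_getNumReactions := by
  intro ant _
  unfold Spec_getNumReactions getNumReactions
  rw [go_eq]
  ring
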